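-- pv_equiv track=rewrite | github.com/qtgeo1248/AdventOfCode | 2022/12/b.py | bfs
-- ===== SOURCE A (Python) =====
-- dirs = [(-1, 0), (1, 0), (0, -1), (0, 1)]
--
-- def bfs(board, g):
--     frontier = [g]
--     dist = 0
--     visited = set()
--     visited.add(g)
--     while len(frontier) > 0:
--         nextLayer = []
--         for u in frontier:
--             if board[u[0]][u[1]] == 0:
--                 return dist
--             for d in dirs:
--                 v = (u[0] + d[0], u[1] + d[1])
--                 if 0 <= v[0] < len(board) and 0 <= v[1] < len(board[v[0]]):
--                     if board[v[0]][v[1]] >= board[u[0]][u[1]] - 1 and v not in visited: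
--                         visited.add(v)
--                         nextLayer.append(v)
--         frontier = nextLayer
--         dist += 1
-- ===== SOURCE B (Python) =====
-- dirs = [(-1, 0), (1, 0), (0, -1), (0, 1)]
--
-- def bfs(board, g):
--     # Fixpoint iteration on the set of cells reachable within k steps:
--     # no queue, no frontier, no incremental visited set.
--     reach = {g}
--     k = 0
--     while True:
--         if any(board[u[0]][u[1]] == 0 for u in reach):
--             return k
--         image = {(u[0] + d[0], u[1] + d[1])
--                  for u in reach for d in dirs
--                  if 0 <= u[0] + d[0] < len(board)
--                  and 0 <= u[1] + d[1] < len(board[u[0] + d[0]])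
--                  and board[u[0] + d[0]][u[1] + d[1]] >= board[u[0]][u[1]] - 1}
--         grown = image - reach
--         if not grown:
--             return None
--         reach |= grown
--         k += 1
-- ===== Notes on version B (the rewrite author's own statement) =====
-- stated objective: alternative
-- what changed: Replaces the queue/frontier BFS by a fixpoint iteration on the set of cells reachable within k steps: each round recomputes the one-step image of the whole set and stops when the set contains a zero-height cell or stabilises; there is no queue, frontier or incremental visited set.
import Mathlib
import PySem

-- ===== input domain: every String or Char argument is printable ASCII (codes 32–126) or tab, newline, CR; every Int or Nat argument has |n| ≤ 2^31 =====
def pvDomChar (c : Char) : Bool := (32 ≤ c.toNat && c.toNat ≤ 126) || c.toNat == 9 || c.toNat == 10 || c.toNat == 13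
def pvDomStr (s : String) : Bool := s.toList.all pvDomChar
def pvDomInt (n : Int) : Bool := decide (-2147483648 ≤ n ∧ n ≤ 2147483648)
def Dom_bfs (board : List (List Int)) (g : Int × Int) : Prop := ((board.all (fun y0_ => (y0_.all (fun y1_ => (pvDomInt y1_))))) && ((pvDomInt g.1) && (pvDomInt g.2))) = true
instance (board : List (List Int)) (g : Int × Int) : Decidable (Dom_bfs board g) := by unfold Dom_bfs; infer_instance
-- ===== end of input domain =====

-- B replaces A's queue/frontier BFS by a fixpoint iteration on the SET of cells reachable
-- within k steps: each round takes the one-step image of the whole set until the set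
-- contains a zero cell or stabilises (alternative algorithm; no frontier, queue or
-- incremental visited set).

-- ===== PORT A =====
-- shared transliterations of Python expressions both sources contain verbatim:
-- the module constant `dirs`, the cell access `board[u[0]][u[1]]` (negative wrap;
-- none = IndexError) and the bound test `0 <= v[0] < len(board) and 0 <= v[1] < len(board[v[0]])`.
def bfsDirs : List (Int × Int) := [(-1, 0), (1, 0), (0, -1), (0, 1)]

def bfsCell? (board : List (List Int)) (u : Int × Int) : Option Int :=
  (PySem.List.pyGet? board u.1).bind (fun row => PySem.List.pyGet? row u.2)

def bfsInB (board : List (List Int)) (v : Int × Int) : Bool :=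
  decide (0 ≤ v.1 ∧ v.1 < (board.length : Int) ∧
    0 ≤ v.2 ∧ v.2 < (((PySem.List.pyGet? board v.1).getD []).length : Int))

-- A's inner `for d in dirs` body: state = (visited, nextLayer)
def bfsStepA (board : List (List Int)) (u : Int × Int) (h : Int)
    (st : PySem.Set (Int × Int) × List (Int × Int)) (d : Int × Int) :
    PySem.Set (Int × Int) × List (Int × Int) :=
  let v : Int × Int := (u.1 + d.1, u.2 + d.2)
  if bfsInB board v then
    if (bfsCell? board v).getD 0 ≥ h - 1 ∧ v ∉ st.1 then
      (PySem.Set.add st.1 v, st.2 ++ [v])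
    else st
  else st

-- A's `for u in frontier` loop; .inl = early return (none encodes Python's IndexError,
-- reachable only outside Pre_bfs)
def bfsInner (board : List (List Int)) :
    PySem.Set (Int × Int) → List (Int × Int) → List (Int × Int) → Int →
    Sum (Option Int) (PySem.Set (Int × Int) × List (Int × Int))
  | visited, [], next, _ => .inr (visited, next)
  | visited, u :: rest, next, dist =>
    match bfsCell? board u with
    | none => .inl none
    | some h =>
      if h = 0 then .inl (some dist)
      else
        let st := bfsDirs.foldl (bfsStepA board u h) (visited, next)
        bfsInner board st.1 rest st.2 dist

-- fuel making the while-loops total; provably sufficient (see bfs_run below)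
def bfsFuel (board : List (List Int)) : Nat :=
  board.length * ((board.map List.length).foldl max 0) + 3

def bfsLoopA (board : List (List Int)) :
    Nat → PySem.Set (Int × Int) → List (Int × Int) → Int → Option (Option Int)
  | 0, _, _, _ => none
  | f + 1, visited, frontier, dist =>
    if frontier = [] then some none
    else
      match bfsInner board visited frontier [] dist with
      | .inl r => some r
      | .inr st => bfsLoopA board f st.1 st.2 (dist + 1)

def bfs (board : List (List Int)) (g : Int × Int) : Option Int :=
  (bfsLoopA board (bfsFuel board) (PySem.Set.add PySem.Set.empty g) [g] 0).getD none

-- ===== PORT B =====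
-- B's set comprehension, for one u: the candidate neighbours
-- (u+d) for d in dirs, if in bounds and board[v] >= board[u]-1
def bfsCand (board : List (List Int)) (u : Int × Int) : List (Int × Int) :=
  bfsDirs.filterMap (fun d =>
    let v : Int × Int := (u.1 + d.1, u.2 + d.2)
    if bfsInB board v ∧ (bfsCell? board v).getD 0 ≥ (bfsCell? board u).getD 0 - 1 then
      some v
    else none)

-- B's `while True` loop over (reach, k); some none encodes the `return None` exit
def bfsLoopB (board : List (List Int)) :
    Nat → PySem.Set (Int × Int) → Int → Option (Option Int)
  | 0, _, _ => none
  | f + 1, reach, k =>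
    if reach.any (fun u => (bfsCell? board u).getD 0 == 0) then some (some k)
    else
      let image : PySem.Set (Int × Int) := PySem.Set.ofList (reach.flatMap (bfsCand board))
      let grown := PySem.Set.diff image reach
      if grown = [] then some none
      else bfsLoopB board f (PySem.Set.union reach grown) (k + 1)

def bfs_alt (board : List (List Int)) (g : Int × Int) : Option Int :=
  (bfsLoopB board (bfsFuel board) (PySem.Set.add PySem.Set.empty g) 0).getD none

-- ===== PRECONDITION & SPEC =====
-- A raises IndexError exactly when the initial lookup board[g[0]][g[1]] is out of range
-- (negative indices wrap as in Python); all later lookups are bounds-checked.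
def Pre_bfs (board : List (List Int)) (g : Int × Int) : Prop :=
  ((PySem.List.pyGet? board g.1).bind (fun row => PySem.List.pyGet? row g.2)).isSome = true
instance (board : List (List Int)) (g : Int × Int) : Decidable (Pre_bfs board g) := by
  unfold Pre_bfs; infer_instance

def pvWitness_bfs : List (List Int) × (Int × Int) := ([[1, 0]], (0, 0))

def Spec_bfs (board : List (List Int)) (g : Int × Int) (out : Option Int) : Prop := out = bfs_alt board g
instance (board : List (List Int)) (g : Int × Int) (out : Option Int) : Decidable (Spec_bfs board g out) := by unfold Spec_bfs; infer_instance

-- ===== CLAIM (what is proved, stated in full; the proofs are below) =====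
def Claim_equal_bfs : Prop := ∀ (board : List (List Int)) (g : Int × Int), Dom_bfs board g → Pre_bfs board g → Spec_bfs board g (bfs board g)

-- ===== LEMMAS AND PROOFS =====

-- the new elements contributed by a scan of L: first occurrences not already in V
def bfsNew (V : List (Int × Int)) : List (Int × Int) → List (Int × Int)
  | [] => []
  | x :: xs => if x ∈ V then bfsNew V xs else x :: bfsNew (V ++ [x]) xs

lemma bfsNew_congr (V₁ V₂ : List (Int × Int)) (hV : ∀ x, x ∈ V₁ ↔ x ∈ V₂) :
    ∀ L, bfsNew V₁ L = bfsNew V₂ L := by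
  intro L
  induction L generalizing V₁ V₂ with
  | nil => rfl
  | cons x xs ih =>
    by_cases hx : x ∈ V₁
    · simp only [bfsNew, if_pos hx, if_pos ((hV x).mp hx)]
      exact ih _ _ hV
    · simp only [bfsNew, if_neg hx, if_neg (fun h => hx ((hV x).mpr h))]
      refine congrArg _ (ih _ _ ?_)
      intro y
      simp only [List.mem_append, List.mem_singleton]
      exact or_congr (hV y) Iff.rfl

lemma bfsNew_append (V : List (Int × Int)) :
    ∀ xs ys, bfsNew V (xs ++ ys) = bfsNew V xs ++ bfsNew (V ++ bfsNew V xs) ys := by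
  intro xs
  induction xs generalizing V with
  | nil => intro ys; simp [bfsNew]
  | cons x xs ih =>
    intro ys
    by_cases hx : x ∈ V
    · simp only [List.cons_append, bfsNew, if_pos hx]
      exact ih V ys
    · simp only [List.cons_append, bfsNew, if_neg hx]
      rw [ih (V ++ [x]) ys]
      simp [List.append_assoc]

lemma bfsNew_sub (V : List (Int × Int)) :
    ∀ xs, (∀ x ∈ xs, x ∈ V) → bfsNew V xs = [] := by
  intro xs
  induction xs with
  | nil => intro _; rfl
  | cons x xs ih =>
    intro h
    simp only [bfsNew, if_pos (h x (by simp))]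
    exact ih (fun y hy => h y (by simp [hy]))

lemma mem_bfsNew (V : List (Int × Int)) :
    ∀ L x, x ∈ bfsNew V L → x ∈ L ∧ x ∉ V := by
  intro L
  induction L generalizing V with
  | nil => intro x hx; simp [bfsNew] at hx
  | cons y ys ih =>
    intro x hx
    by_cases hy : y ∈ V
    · simp only [bfsNew, if_pos hy] at hx
      obtain ⟨h1, h2⟩ := ih V x hx
      exact ⟨by simp [h1], h2⟩
    · simp only [bfsNew, if_neg hy, List.mem_cons] at hx
      rcases hx with rfl | hx
      · exact ⟨by simp, hy⟩
      · obtain ⟨h1, h2⟩ := ih (V ++ [y]) x hx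
        exact ⟨by simp [h1], fun hxV => h2 (by simp [hxV])⟩

lemma mem_append_bfsNew (V : List (Int × Int)) :
    ∀ L x, x ∈ L → x ∈ V ++ bfsNew V L := by
  intro L
  induction L generalizing V with
  | nil => intro x hx; simp at hx
  | cons y ys ih =>
    intro x hx
    by_cases hy : y ∈ V
    · simp only [bfsNew, if_pos hy]
      rcases List.mem_cons.mp hx with rfl | hx
      · simp [hy]
      · exact ih V x hx
    · simp only [bfsNew, if_neg hy]
      rcases List.mem_cons.mp hx with rfl | hx
      · simp
      · have := ih (V ++ [y]) x hx
        simp only [List.mem_append, List.mem_cons] at this ⊢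
        tauto

lemma nodup_append_bfsNew (V : List (Int × Int)) :
    ∀ L, V.Nodup → (V ++ bfsNew V L).Nodup := by
  intro L
  induction L generalizing V with
  | nil => intro h; simpa [bfsNew]
  | cons y ys ih =>
    intro h
    by_cases hy : y ∈ V
    · simpa only [bfsNew, if_pos hy] using ih V h
    · have h' : (V ++ [y]).Nodup := by
        rw [List.nodup_append]
        refine ⟨h, List.nodup_singleton y, ?_⟩
        intro a hab b hb
        rw [List.mem_singleton] at hb
        subst hb
        intro hEq
        exact hy (hEq ▸ hab)
      have := ih (V ++ [y]) h'
      simpa only [bfsNew, if_neg hy, List.append_assoc, List.singleton_append] using this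

-- Python's `set(L) - V` is exactly bfsNew V L
lemma bfs_filter_foldl (V : List (Int × Int)) :
    ∀ (L S : List (Int × Int)),
      (L.foldl PySem.Set.add S).filter (fun x => !(PySem.Set.contains V x)) =
        S.filter (fun x => !(PySem.Set.contains V x)) ++ bfsNew (V ++ S) L := by
  intro L
  induction L with
  | nil => intro S; simp [bfsNew]
  | cons x L ih =>
    intro S
    by_cases hxS : x ∈ S
    · rw [List.foldl_cons, PySem.Set.add_of_mem hxS]
      rw [ih S]
      have : bfsNew (V ++ S) (x :: L) = bfsNew (V ++ S) L := by
        simp [bfsNew, hxS]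
      rw [this]
    · rw [List.foldl_cons, PySem.Set.add_of_not_mem hxS, ih (S ++ [x])]
      by_cases hxV : x ∈ V
      · have h1 : (S ++ [x]).filter (fun y => !(PySem.Set.contains V y)) =
            S.filter (fun y => !(PySem.Set.contains V y)) := by
          simp [List.filter_append, PySem.Set.contains, List.contains_eq_mem, hxV]
        have h2 : bfsNew (V ++ (S ++ [x])) L = bfsNew (V ++ S) L := by
          apply bfsNew_congr
          intro y
          simp only [List.mem_append, List.mem_singleton]
          constructor
          · rintro (h | h | rfl)
            exacts [Or.inl h, Or.inr h, Or.inl hxV]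
          · rintro (h | h)
            exacts [Or.inl h, Or.inr (Or.inl h)]
        rw [h1, h2]
        have h3 : bfsNew (V ++ S) (x :: L) = bfsNew (V ++ S) L := by
          simp [bfsNew, hxV]
        rw [h3]
      · have h1 : (S ++ [x]).filter (fun y => !(PySem.Set.contains V y)) =
            S.filter (fun y => !(PySem.Set.contains V y)) ++ [x] := by
          simp [List.filter_append, PySem.Set.contains, List.contains_eq_mem, hxV]
        have h3 : bfsNew (V ++ S) (x :: L) = x :: bfsNew (V ++ S ++ [x]) L := by
          have : x ∉ V ++ S := by simp [hxV, hxS]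
          simp [bfsNew, this, List.append_assoc]
        rw [h1, h3, List.append_assoc, List.singleton_append, List.append_assoc]

lemma bfs_grown_eq (V L : List (Int × Int)) :
    PySem.Set.diff (PySem.Set.ofList L) V = bfsNew V L := by
  have := bfs_filter_foldl V L []
  simpa [PySem.Set.diff, PySem.Set.ofList, PySem.Set.empty, PySem.Set.contains] using this

-- an in-bounds cell has a value
lemma bfs_cell_some (board : List (List Int)) (x : Int × Int)
    (h : bfsInB board x = true) : (bfsCell? board x).isSome = true := by
  simp only [bfsInB, decide_eq_true_eq] at h
  obtain ⟨h0, h1, h2, h3⟩ := h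
  have hlt : x.1.toNat < board.length := by omega
  rw [PySem.List.pyGet?_of_nonneg board h0, List.getElem?_eq_getElem hlt,
    Option.getD_some] at h3
  have hlt2 : x.2.toNat < board[x.1.toNat].length := by omega
  simp [bfsCell?, PySem.List.pyGet?_of_nonneg board h0, List.getElem?_eq_getElem hlt,
    PySem.List.pyGet?_of_nonneg _ h2, List.getElem?_eq_getElem hlt2]

lemma mem_bfsCand_inB (board : List (List Int)) (u v : Int × Int)
    (h : v ∈ bfsCand board u) : bfsInB board v = true := by
  simp only [bfsCand, List.mem_filterMap] at h
  obtain ⟨d, _, hd⟩ := h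
  by_cases hc : bfsInB board (u.1 + d.1, u.2 + d.2) = true ∧
      (bfsCell? board (u.1 + d.1, u.2 + d.2)).getD 0 ≥ (bfsCell? board u).getD 0 - 1
  · simp only [hc, and_self, if_pos, Option.some.injEq] at hd
    · exact hd ▸ hc.1
  · simp only [if_neg hc] at hd
    cases hd

-- candidate list relative to an explicit height (A's `h`)
def bfsCandD (board : List (List Int)) (u : Int × Int) (h : Int)
    (ds : List (Int × Int)) : List (Int × Int) :=
  ds.filterMap (fun d =>
    let v : Int × Int := (u.1 + d.1, u.2 + d.2)
    if bfsInB board v ∧ (bfsCell? board v).getD 0 ≥ h - 1 then some v else none)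

lemma bfsCand_eq (board : List (List Int)) (u : Int × Int) (h : Int)
    (hc : bfsCell? board u = some h) : bfsCand board u = bfsCandD board u h bfsDirs := by
  simp [bfsCand, bfsCandD, hc]

lemma bfs_stepA_fold (board : List (List Int)) (u : Int × Int) (h : Int) :
    ∀ (ds : List (Int × Int)) (vis next : List (Int × Int)),
      ds.foldl (bfsStepA board u h) (vis, next) =
        (vis ++ bfsNew vis (bfsCandD board u h ds),
         next ++ bfsNew vis (bfsCandD board u h ds)) := by
  intro ds
  induction ds with
  | nil => intro vis next; simp [bfsCandD, bfsNew]
  | cons d ds ih =>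
    intro vis next
    have hstep : bfsStepA board u h (vis, next) d =
        if bfsInB board (u.1 + d.1, u.2 + d.2) then
          if (bfsCell? board (u.1 + d.1, u.2 + d.2)).getD 0 ≥ h - 1 ∧
              (u.1 + d.1, u.2 + d.2) ∉ vis then
            (PySem.Set.add vis (u.1 + d.1, u.2 + d.2), next ++ [(u.1 + d.1, u.2 + d.2)])
          else (vis, next)
        else (vis, next) := rfl
    by_cases hb : bfsInB board (u.1 + d.1, u.2 + d.2) = true
    · by_cases hh : (bfsCell? board (u.1 + d.1, u.2 + d.2)).getD 0 ≥ h - 1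
      · have hcand' : bfsCandD board u h (d :: ds) =
            (u.1 + d.1, u.2 + d.2) :: bfsCandD board u h ds := by
          simp only [bfsCandD, List.filterMap_cons]
          rw [if_pos ⟨hb, hh⟩]
        by_cases hmem : (u.1 + d.1, u.2 + d.2) ∈ vis
        · have hs : bfsStepA board u h (vis, next) d = (vis, next) := by
            rw [hstep, if_pos hb, if_neg (by tauto)]
          rw [List.foldl_cons, hs, ih vis next, hcand']
          simp [bfsNew, hmem]
        · have hs : bfsStepA board u h (vis, next) d =
              (vis ++ [(u.1 + d.1, u.2 + d.2)], next ++ [(u.1 + d.1, u.2 + d.2)]) := by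
            rw [hstep, if_pos hb, if_pos ⟨hh, hmem⟩, PySem.Set.add_of_not_mem hmem]
          rw [List.foldl_cons, hs,
            ih (vis ++ [(u.1 + d.1, u.2 + d.2)]) (next ++ [(u.1 + d.1, u.2 + d.2)]), hcand']
          simp [bfsNew, hmem, List.append_assoc]
      · have hcand' : bfsCandD board u h (d :: ds) = bfsCandD board u h ds := by
          simp only [bfsCandD, List.filterMap_cons]
          rw [if_neg (by tauto)]
        have hs : bfsStepA board u h (vis, next) d = (vis, next) := by
          rw [hstep, if_pos hb, if_neg (by tauto)]
        rw [List.foldl_cons, hs, ih vis next, hcand']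
    · have hcand' : bfsCandD board u h (d :: ds) = bfsCandD board u h ds := by
        simp only [bfsCandD, List.filterMap_cons]
        rw [if_neg (by tauto)]
      have hs : bfsStepA board u h (vis, next) d = (vis, next) := by
        rw [hstep, if_neg hb]
      rw [List.foldl_cons, hs, ih vis next, hcand']

lemma bfsInner_ret (board : List (List Int)) (dist : Int) :
    ∀ (F : List (Int × Int)), (∀ u ∈ F, (bfsCell? board u).isSome = true) →
      (∃ u ∈ F, bfsCell? board u = some 0) →
      ∀ (vis next : List (Int × Int)),
        bfsInner board vis F next dist = .inl (some dist) := by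
  intro F
  induction F with
  | nil => intro _ hz; simp at hz
  | cons u rest ih =>
    intro hsome hz vis next
    obtain ⟨h, hcell⟩ := Option.isSome_iff_exists.mp (hsome u (by simp))
    by_cases h0 : h = 0
    · simp [bfsInner, hcell, h0]
    · have hz' : ∃ w ∈ rest, bfsCell? board w = some 0 := by
        obtain ⟨w, hw, hwz⟩ := hz
        rcases List.mem_cons.mp hw with rfl | hw
        · rw [hcell] at hwz; cases hwz; exact absurd rfl h0
        · exact ⟨w, hw, hwz⟩
      simp only [bfsInner, hcell, if_neg h0]
      exact ih (fun w hw => hsome w (by simp [hw])) hz' _ _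

lemma bfsInner_step (board : List (List Int)) (dist : Int) :
    ∀ (F vis next : List (Int × Int)),
      (∀ u ∈ F, ∃ h, bfsCell? board u = some h ∧ h ≠ 0) →
      bfsInner board vis F next dist =
        .inr (vis ++ bfsNew vis (F.flatMap (bfsCand board)),
              next ++ bfsNew vis (F.flatMap (bfsCand board))) := by
  intro F
  induction F with
  | nil => intro vis next _; simp [bfsInner, bfsNew]
  | cons u rest ih =>
    intro vis next hF
    obtain ⟨h, hcell, hne⟩ := hF u (by simp)
    simp only [bfsInner, hcell, if_neg hne]
    rw [bfs_stepA_fold board u h bfsDirs vis next]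
    rw [ih _ _ (fun w hw => hF w (by simp [hw]))]
    rw [← bfsCand_eq board u h hcell]
    have hsplit : (u :: rest).flatMap (bfsCand board) =
        bfsCand board u ++ rest.flatMap (bfsCand board) := by simp
    rw [hsplit, bfsNew_append]
    simp [List.append_assoc]

-- max row length, size bound for the visited/reach set
def bfsM (board : List (List Int)) : Nat := (board.map List.length).foldl max 0

def bfsOK (board : List (List Int)) (g : Int × Int) (vis : List (Int × Int)) : Prop :=
  vis.Nodup ∧ ∀ x ∈ vis, x = g ∨ bfsInB board x = true

lemma bfs_row_len_le (board : List (List Int)) (i : Int) (h0 : 0 ≤ i)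
    (h1 : i < (board.length : Int)) :
    ((PySem.List.pyGet? board i).getD []).length ≤ bfsM board := by
  have hlt : i.toNat < board.length := by omega
  rw [PySem.List.pyGet?_of_nonneg board h0]
  have : board[i.toNat]?.getD [] = board[i.toNat] := by simp [List.getElem?_eq_getElem hlt]
  rw [this]
  have hmem : board[i.toNat].length ∈ board.map List.length :=
    List.mem_map_of_mem (List.getElem_mem hlt)
  exact ((PySem.List.le_foldl_max (board.map List.length) 0).2 _ hmem)

lemma bfs_visited_card (board : List (List Int)) (g : Int × Int) (vis : List (Int × Int))
    (hok : bfsOK board g vis) : vis.length ≤ board.length * bfsM board + 1 := by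
  classical
  obtain ⟨hnd, hval⟩ := hok
  set cellsF : Finset (Int × Int) :=
    ((Finset.range board.length) ×ˢ (Finset.range (bfsM board))).image
      (fun p => ((p.1 : Int), (p.2 : Int))) with hcells
  have hsub : vis.toFinset ⊆ insert g cellsF := by
    intro x hx
    rcases hval x (List.mem_toFinset.mp hx) with hxg | hxv
    · exact Finset.mem_insert.mpr (Or.inl hxg)
    · refine Finset.mem_insert.mpr (Or.inr ?_)
      simp only [bfsInB, decide_eq_true_eq] at hxv
      obtain ⟨h0, h1, h2, h3⟩ := hxv
      have h3' : x.2 < ((bfsM board : Nat) : Int) := by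
        have := bfs_row_len_le board x.1 h0 h1
        omega
      refine Finset.mem_image.mpr ⟨(x.1.toNat, x.2.toNat), ?_, ?_⟩
      · simp only [Finset.mem_product, Finset.mem_range]
        constructor <;> omega
      · simp only
        have e1 : ((x.1.toNat : Nat) : Int) = x.1 := Int.toNat_of_nonneg h0
        have e2 : ((x.2.toNat : Nat) : Int) = x.2 := Int.toNat_of_nonneg h2
        exact Prod.ext e1 e2
  calc vis.length = vis.toFinset.card := (List.toFinset_card_of_nodup hnd).symm
    _ ≤ (insert g cellsF).card := Finset.card_le_card hsub
    _ ≤ cellsF.card + 1 := Finset.card_insert_le _ _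
    _ ≤ ((Finset.range board.length) ×ˢ (Finset.range (bfsM board))).card + 1 := by
        exact Nat.add_le_add_right (Finset.card_image_le) 1
    _ = board.length * bfsM board + 1 := by simp

-- LOOP INVARIANT: vis = already-checked layers ++ current frontier F; the checked part
-- is zero-free and closed under bfsCand; vis is duplicate-free and contains only g or
-- in-bounds cells
def bfsInv (board : List (List Int)) (g : Int × Int) (vis F : List (Int × Int)) : Prop :=
  (∃ pre, vis = pre ++ F ∧
     (∀ u ∈ pre, (bfsCell? board u).getD 0 ≠ 0) ∧
     (∀ u ∈ pre, ∀ v ∈ bfsCand board u, v ∈ vis)) ∧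
  vis.Nodup ∧ (∀ x ∈ vis, x = g ∨ bfsInB board x = true)

-- MAIN SIMULATION: under the invariant both loops terminate with the same result
lemma bfs_run (board : List (List Int)) (g : Int × Int)
    (hg : (bfsCell? board g).isSome = true) :
    ∀ (fa fb : Nat) (vis F : List (Int × Int)) (k : Int), bfsInv board g vis F →
      bfsFuel board ≤ fa + vis.length → bfsFuel board ≤ fb + vis.length →
      ∃ r, bfsLoopA board fa vis F k = some r ∧ bfsLoopB board fb vis k = some r := by
  have hfuel : bfsFuel board = board.length * bfsM board + 3 := by
    simp [bfsFuel, bfsM]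
  intro fa
  induction fa with
  | zero =>
    intro fb vis F k hinv ha _
    exfalso
    have := bfs_visited_card board g vis ⟨hinv.2.1, hinv.2.2⟩
    omega
  | succ fa ih =>
    intro fb vis F k hinv ha hb
    obtain ⟨⟨pre, hpre, hprez, hprec⟩, hnd, hmemb⟩ := hinv
    have hcard := bfs_visited_card board g vis ⟨hnd, hmemb⟩
    cases fb with
    | zero => exfalso; omega
    | succ fb =>
      have hsome : ∀ u ∈ vis, (bfsCell? board u).isSome = true := by
        intro u hu
        rcases hmemb u hu with rfl | hib
        · exact hg
        · exact bfs_cell_some board u hib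
      by_cases hz : ∃ u ∈ F, bfsCell? board u = some 0
      · -- a zero cell is in the frontier: both return the current distance
        obtain ⟨u, hu, hu0⟩ := hz
        have hFne : F ≠ [] := by rintro rfl; simp at hu
        have hFsome : ∀ w ∈ F, (bfsCell? board w).isSome = true := by
          intro w hw; exact hsome w (by rw [hpre]; simp [hw])
        have hret := bfsInner_ret board k F hFsome ⟨u, hu, hu0⟩ vis []
        have hmem : u ∈ vis := by rw [hpre]; simp [hu]
        have hany : vis.any (fun w => (bfsCell? board w).getD 0 == 0) = true := by
          rw [List.any_eq_true]
          exact ⟨u, hmem, by simp [hu0]⟩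
        refine ⟨some k, ?_, ?_⟩
        · simp [bfsLoopA, if_neg hFne, hret]
        · simp [bfsLoopB, hany]
      · -- no zero anywhere in vis
        have hFnz : ∀ u ∈ F, ∃ h, bfsCell? board u = some h ∧ h ≠ 0 := by
          intro u hu
          obtain ⟨h, hc⟩ := Option.isSome_iff_exists.mp
            (hsome u (by rw [hpre]; simp [hu]))
          refine ⟨h, hc, fun h0 => hz ⟨u, hu, h0 ▸ hc⟩⟩
        have hvnz : ∀ u ∈ vis, (bfsCell? board u).getD 0 ≠ 0 := by
          intro u hu
          rw [hpre] at hu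
          rcases List.mem_append.mp hu with hu | hu
          · exact hprez u hu
          · obtain ⟨h, hc, hne⟩ := hFnz u hu
            simp [hc, hne]
        have hany : vis.any (fun u => (bfsCell? board u).getD 0 == 0) = false := by
          rw [List.any_eq_false]
          intro u hu
          simpa using hvnz u hu
        -- the new cells of this round
        set Δ := bfsNew vis (F.flatMap (bfsCand board)) with hΔdef
        have hgrown : PySem.Set.diff
            (PySem.Set.ofList (vis.flatMap (bfsCand board))) vis = Δ := by
          rw [bfs_grown_eq]
          rw [hpre, List.flatMap_append, bfsNew_append]
          have hsub : bfsNew (pre ++ F) (pre.flatMap (bfsCand board)) = [] := by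
            apply bfsNew_sub
            intro x hx
            obtain ⟨u, hu, hxu⟩ := List.mem_flatMap.mp hx
            have := hprec u hu x hxu
            rwa [hpre] at this
          rw [hsub]
          simp only [List.nil_append, List.append_nil]
          exact (bfsNew_congr _ _ (fun x => by rw [hpre]) _)
        have hBun : bfsLoopB board (fb + 1) vis k =
            (if Δ = [] then some none
             else bfsLoopB board fb (PySem.Set.union vis Δ) (k + 1)) := by
          simp only [bfsLoopB, hany, Bool.false_eq_true, if_false, hgrown]
        by_cases hF : F = []
        · -- empty frontier: both report failure
          subst hF
          have hΔnil : Δ = [] := by simp [hΔdef, bfsNew]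
          exact ⟨none, by simp [bfsLoopA], by rw [hBun, if_pos hΔnil]⟩
        · have hstep := bfsInner_step board k F vis [] hFnz
          have hAun : bfsLoopA board (fa + 1) vis F k = bfsLoopA board fa (vis ++ Δ) Δ (k + 1) := by
            simp only [bfsLoopA, if_neg hF, hstep, List.nil_append]
            rw [← hΔdef]
          by_cases hΔ : Δ = []
          · -- no growth: A needs one more (empty-frontier) round, B stops now
            refine ⟨none, ?_, by rw [hBun, if_pos hΔ]⟩
            rw [hAun, hΔ]
            cases fa with
            | zero => exfalso; omega
            | succ fa => simp [bfsLoopA]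
          · -- growth: recurse with the enlarged set
            have hΔnodup : (vis ++ Δ).Nodup := nodup_append_bfsNew vis _ hnd
            have hΔdisj : ∀ x ∈ Δ, x ∉ vis := fun x hx => (mem_bfsNew vis _ x hx).2
            have hΔn : Δ.Nodup := (List.nodup_append.mp hΔnodup).2.1
            have hun : PySem.Set.union vis Δ = vis ++ Δ :=
              PySem.Set.update_eq_append_of_disjoint vis Δ hΔn hΔdisj
            have hinv' : bfsInv board g (vis ++ Δ) Δ := by
              refine ⟨⟨vis, rfl, hvnz, ?_⟩, hΔnodup, ?_⟩
              · intro u hu v hv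
                rw [hpre] at hu
                rcases List.mem_append.mp hu with hu | hu
                · have := hprec u hu v hv
                  simp [this]
                · have : v ∈ F.flatMap (bfsCand board) := List.mem_flatMap.mpr ⟨u, hu, hv⟩
                  exact mem_append_bfsNew vis _ v this
              · intro x hx
                rcases List.mem_append.mp hx with hx | hx
                · exact hmemb x hx
                · obtain ⟨hx1, _⟩ := mem_bfsNew vis _ x hx
                  obtain ⟨u, _, hxu⟩ := List.mem_flatMap.mp hx1
                  exact Or.inr (mem_bfsCand_inB board u x hxu)
            have hΔpos : 1 ≤ Δ.length := by
              rcases List.exists_cons_of_ne_nil hΔ with ⟨a, t, hat⟩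
              simp [hat]
            obtain ⟨r, hA, hB⟩ := ih fb (vis ++ Δ) Δ (k + 1) hinv'
              (by simp only [List.length_append]; omega)
              (by simp only [List.length_append]; omega)
            exact ⟨r, by rw [hAun]; exact hA, by rw [hBun, if_neg hΔ, hun]; exact hB⟩

lemma bfs_vis0 (g : Int × Int) : PySem.Set.add PySem.Set.empty g = [g] := by
  simp [PySem.Set.add, PySem.Set.empty, PySem.Set.contains]

lemma bfs_eq_alt (board : List (List Int)) (g : Int × Int)
    (hg : (bfsCell? board g).isSome = true) : bfs board g = bfs_alt board g := by
  have hinv : bfsInv board g [g] [g] := by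
    refine ⟨⟨[], rfl, by simp, by simp⟩, List.nodup_singleton g, ?_⟩
    intro x hx
    exact Or.inl (List.mem_singleton.mp hx)
  obtain ⟨r, hA, hB⟩ := bfs_run board g hg (bfsFuel board) (bfsFuel board) [g] [g] 0 hinv
    (by simp) (by simp)
  simp only [bfs, bfs_alt, bfs_vis0]
  rw [hA, hB]

-- ===== VERDICT (by name: the statement is the Claim_ definition above) =====
theorem bfs_spec : Claim_equal_bfs := by
  intro board g _ hpre
  unfold Spec_bfs
  exact bfs_eq_alt board g hpre
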